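-- pv_equiv track=rewrite | github.com/chenchuraviteja/test_repository | 16_updated_script.py | format_java_opts
-- ===== SOURCE A (Python) =====
-- def format_java_opts(java_opts_str):
--     """Formats JAVA_OPTS with proper line breaks."""
--     opts = []
--     current = []
--     for part in java_opts_str.split():
--         if part.startswith('-'):
--             if current:
--                 opts.append(' '.join(current))
--                 current = []
--             current.append(part)
--         else:
--             current.append(part)
--     if current:
--         opts.append(' '.join(current))
--     return '\n'.join(opts)
-- ===== SOURCE B (Python) =====
-- def format_java_opts(java_opts_str):
--     """Formats JAVA_OPTS with proper line breaks."""
--     pieces = []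
--     for tok in java_opts_str.split():
--         if pieces:
--             pieces.append('\n' if tok.startswith('-') else ' ')
--         pieces.append(tok)
--     return ''.join(pieces)
-- ===== Notes on version B (the rewrite author's own statement) =====
-- stated objective: simpler
-- what changed: Replaces A's two-level accumulator (list of groups + current group, each group joined with ' ' and the groups joined with '\n') by a single flat pass that emits each token preceded by the separator it deserves ('\n' before a flag, ' ' otherwise) and one final str.join on the empty separator.
import Mathlib
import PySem

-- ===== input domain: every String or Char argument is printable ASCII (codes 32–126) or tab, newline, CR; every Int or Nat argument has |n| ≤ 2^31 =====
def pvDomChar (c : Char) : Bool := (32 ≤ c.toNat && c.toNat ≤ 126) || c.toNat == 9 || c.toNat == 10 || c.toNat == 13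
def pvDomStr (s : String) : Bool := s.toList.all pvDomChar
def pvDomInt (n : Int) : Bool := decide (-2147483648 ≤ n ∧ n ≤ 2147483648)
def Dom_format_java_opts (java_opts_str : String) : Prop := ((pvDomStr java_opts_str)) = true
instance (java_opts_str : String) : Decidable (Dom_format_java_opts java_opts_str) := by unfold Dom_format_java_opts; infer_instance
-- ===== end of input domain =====

-- B is the same O(n) pass written flat: one piece list with an explicit separator per token, instead of A's group-of-groups accumulator (objective: simpler).

-- ===== PORT A =====
-- loop body of A: state = (opts, current)
def fjoStepA (st : List String × List String) (part : String) : List String × List String :=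
  if PySem.Str.startswith part "-" then
    if st.2 ≠ [] then (st.1 ++ [PySem.Str.join " " st.2], [] ++ [part])
    else (st.1, st.2 ++ [part])
  else (st.1, st.2 ++ [part])

def format_java_opts (java_opts_str : String) : String :=
  let st := (PySem.Str.split₀ java_opts_str).foldl fjoStepA ([], [])
  let opts := if st.2 ≠ [] then st.1 ++ [PySem.Str.join " " st.2] else st.1
  PySem.Str.join "\n" opts

-- ===== PORT B =====
-- loop body of B: state = pieces
def fjoStepB (pieces : List String) (tok : String) : List String :=
  (if pieces ≠ []
     then pieces ++ [if PySem.Str.startswith tok "-" then "\n" else " "]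
     else pieces) ++ [tok]

def format_java_opts_alt (java_opts_str : String) : String :=
  PySem.Str.join "" ((PySem.Str.split₀ java_opts_str).foldl fjoStepB [])

-- ===== PRECONDITION & SPEC =====
def Spec_format_java_opts (java_opts_str : String) (out : String) : Prop := out = format_java_opts_alt java_opts_str
instance (java_opts_str : String) (out : String) : Decidable (Spec_format_java_opts java_opts_str out) := by unfold Spec_format_java_opts; infer_instance

-- ===== CLAIM (what is proved, stated in full; the proofs are below) =====
def Claim_equal_format_java_opts : Prop := ∀ (java_opts_str : String), Dom_format_java_opts java_opts_str → Spec_format_java_opts java_opts_str (format_java_opts java_opts_str)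

-- ===== LEMMAS AND PROOFS =====

theorem fjo_join_singleton (sep a : String) : PySem.Str.join sep [a] = a := by
  apply String.toList_inj.mp
  simp [PySem.Str.toList_join, PySem.Chars.join_singleton]

theorem fjo_join_snoc (sep : String) (xs : List String) (a : String) (h : xs ≠ []) :
    PySem.Str.join sep (xs ++ [a]) = PySem.Str.join sep xs ++ sep ++ a := by
  apply String.toList_inj.mp
  induction xs with
  | nil => exact absurd rfl h
  | cons x rest ih =>
    cases rest with
    | nil =>
      simp [PySem.Str.toList_join, PySem.Chars.join_cons_cons, PySem.Chars.join_singleton]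
    | cons y rest' =>
      simp only [List.cons_append, PySem.Str.toList_join, List.map_cons, List.map_append,
        PySem.Chars.join_cons_cons, String.toList_append] at ih ⊢
      rw [ih (by simp)]
      simp [List.append_assoc]

-- the loop invariant: B's flat piece list renders exactly A's (opts, current) state
theorem fjo_inv (ts : List String) (opts cur pieces : List String)
    (hcur : cur ≠ []) (hp : pieces ≠ [])
    (heq : PySem.Str.join "" pieces = PySem.Str.join "\n" (opts ++ [PySem.Str.join " " cur])) :
    PySem.Str.join "" (ts.foldl fjoStepB pieces) =
      (let st := ts.foldl fjoStepA (opts, cur)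
       PySem.Str.join "\n" (if st.2 ≠ [] then st.1 ++ [PySem.Str.join " " st.2] else st.1)) := by
  induction ts generalizing opts cur pieces with
  | nil => simpa [hcur] using heq
  | cons t ts ih =>
    simp only [List.foldl_cons]
    by_cases hflag : PySem.Str.startswith t "-"
    · have hf : PySem.Chars.startswith t.toList ['-'] = true := by simpa using hflag
      rw [show fjoStepA (opts, cur) t = (opts ++ [PySem.Str.join " " cur], [t]) by
        simp [fjoStepA, hf, hcur]]
      rw [show fjoStepB pieces t = pieces ++ ["\n"] ++ [t] by simp [fjoStepB, hf, hp]]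
      apply ih _ _ _ (by simp) (by simp)
      rw [fjo_join_snoc _ _ _ (by simp [hp]), fjo_join_snoc _ _ _ hp,
          fjo_join_snoc _ _ _ (by simp), fjo_join_singleton, heq]
      apply String.toList_inj.mp
      simp [String.toList_append, List.append_assoc]
    · have hf : PySem.Chars.startswith t.toList ['-'] = false := by simpa using hflag
      rw [show fjoStepA (opts, cur) t = (opts, cur ++ [t]) by simp [fjoStepA, hf]]
      rw [show fjoStepB pieces t = pieces ++ [" "] ++ [t] by simp [fjoStepB, hf, hp]]
      apply ih _ _ _ (by simp) (by simp)
      rw [fjo_join_snoc _ _ _ (by simp [hp]), fjo_join_snoc _ _ _ hp, heq,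
          fjo_join_snoc _ _ _ hcur]
      cases opts with
      | nil =>
        simp only [List.nil_append]
        rw [fjo_join_singleton, fjo_join_singleton]
        apply String.toList_inj.mp
        simp [String.toList_append, List.append_assoc]
      | cons o os =>
        rw [fjo_join_snoc _ _ _ (by simp), fjo_join_snoc _ _ _ (by simp)]
        apply String.toList_inj.mp
        simp [String.toList_append, List.append_assoc]

-- ===== VERDICT (by name: the statement is the Claim_ definition above) =====
theorem format_java_opts_spec : Claim_equal_format_java_opts := by
  intro s _
  unfold Spec_format_java_opts format_java_opts format_java_opts_alt
  cases hts : PySem.Str.split₀ s with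
  | nil => rfl
  | cons t ts =>
    simp only [List.foldl_cons]
    rw [show fjoStepA ([], []) t = ([], [t]) by simp [fjoStepA],
        show fjoStepB [] t = [t] by simp [fjoStepB]]
    exact (fjo_inv ts [] [t] [t] (by simp) (by simp)
      (by simp [fjo_join_singleton])).symm
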